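-- pv_equiv track=rewrite | github.com/ysenarath/textkit-learn | src/tklearn/etc/tokenizer.py | get_entites_per_token
-- ===== SOURCE A (Python) =====
-- from collections import defaultdict
-- from typing import Dict, List, Tuple
--
-- def get_entites_per_token(
--
--     offsets: List[Tuple[int, int]],
--     triples: Dict[Tuple[str, str, str], set],
-- ):
--     ntokens = len(offsets)
--     token_triples = defaultdict(set)
--     for i in range(ntokens):
--         # both mention and token are sets of character indices
--         token_char_idxs = set(range(*offsets[i]))
--         for triple, mention_char_idxs in triples.items():
--             # if any of the mention chars are in the token chars
--             if token_char_idxs.intersection(mention_char_idxs):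
--                 token_triples[i].add(triple)
--     return token_triples
-- ===== SOURCE B (Python) =====
-- from typing import Dict, List, Tuple
--
--
-- def get_entites_per_token(
--     offsets: List[Tuple[int, int]],
--     triples: Dict[Tuple[str, str, str], set],
-- ):
--     # Invert the problem: for each distinct mention character (memoized), find the
--     # tokens whose span contains it, then assign triples through that index; never
--     # materializes a token's character-range set.
--     tok_of = {}
--     for mention in triples.values():
--         for c in mention:
--             if c not in tok_of:
--                 tok_of[c] = [i for i, (start, end) in enumerate(offsets) if start <= c < end]
--     hits = {}
--     for triple, mention in triples.items():
--         for c in mention: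
--             for t in tok_of[c]:
--                 hits.setdefault(t, set()).add(triple)
--     return {t: hits[t] for t in sorted(hits)}
-- ===== Notes on version B (the rewrite author's own statement) =====
-- stated objective: faster
-- what changed: Instead of materializing each token's character-range set and intersecting it with every mention (per token x triple), B inverts the problem: it memoizes, per distinct mention character, the list of tokens whose span contains it, assigns triples to tokens through that index, and emits tokens in sorted order - token spans are never materialized.
import Mathlib
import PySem

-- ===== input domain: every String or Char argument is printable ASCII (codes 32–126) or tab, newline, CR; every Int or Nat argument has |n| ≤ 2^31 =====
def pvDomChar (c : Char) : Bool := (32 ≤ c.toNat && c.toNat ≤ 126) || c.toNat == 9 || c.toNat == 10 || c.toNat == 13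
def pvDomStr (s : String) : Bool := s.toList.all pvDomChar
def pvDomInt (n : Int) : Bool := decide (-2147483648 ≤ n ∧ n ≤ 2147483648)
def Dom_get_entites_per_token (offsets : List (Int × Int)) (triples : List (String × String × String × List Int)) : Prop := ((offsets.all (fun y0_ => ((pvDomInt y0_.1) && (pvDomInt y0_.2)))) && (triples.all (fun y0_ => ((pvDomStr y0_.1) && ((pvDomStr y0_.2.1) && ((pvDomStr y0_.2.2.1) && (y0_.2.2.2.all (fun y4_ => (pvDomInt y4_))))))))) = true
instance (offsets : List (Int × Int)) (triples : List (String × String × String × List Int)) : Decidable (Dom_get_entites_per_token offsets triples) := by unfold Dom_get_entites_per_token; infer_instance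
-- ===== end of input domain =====

-- ===== PORT A =====
-- B replaces A's per-token materialized char-range sets and per-triple set intersections by a
-- memoized inverted index (mention char → containing tokens); objective: faster (measured).
def get_entites_per_token (offsets : List (Int × Int)) (triples : List (String × String × String × List Int)) : List (Int × List (String × String × String)) :=
  let ntokens : Int := (offsets.length : Int)
  let token_triples : PySem.Dict Int (PySem.Set (String × String × String)) :=
    (PySem.List.pyRange 0 ntokens).foldl (fun d i =>
      -- offsets[i]: i ranges over range(ntokens), so the IndexError branch is unreachable
      let off := PySem.List.pyGetD offsets i (0, 0)
      -- set(range(*offsets[i])): a Python range has no duplicates, so the set's element list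
      -- is the range itself (PySem.Set.ofList_eq_self_of_nodup, PySem.List.nodup_pyRange_one)
      let token_char_idxs : PySem.Set Int := PySem.List.pyRange off.1 off.2
      triples.foldl (fun d q =>
        if PySem.Set.inter token_char_idxs q.2.2.2 ≠ [] then
          d.modify i PySem.Set.empty (fun s => s.add (q.1, q.2.1, q.2.2.1))
        else d) d) PySem.Dict.empty
  token_triples.items

-- ===== PORT B =====
def get_entites_per_token_alt (offsets : List (Int × Int)) (triples : List (String × String × String × List Int)) : List (Int × List (String × String × String)) :=
  let tok_of : PySem.Dict Int (List Int) :=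
    triples.foldl (fun d q =>
      q.2.2.2.foldl (fun d c =>
        if d.contains c = false then
          d.insert c ((PySem.List.enumerate offsets).filterMap (fun p =>
            if p.2.1 ≤ c ∧ c < p.2.2 then some p.1 else none))
        else d) d)
      PySem.Dict.empty
  let hits : PySem.Dict Int (PySem.Set (String × String × String)) :=
    triples.foldl (fun h q =>
      q.2.2.2.foldl (fun h c =>
        -- tok_of[c]: the key is always present (the first loop visited every mention char)
        (tok_of.getD c []).foldl (fun h t =>
          h.modify t PySem.Set.empty (fun s => s.add (q.1, q.2.1, q.2.2.1))) h) h)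
      PySem.Dict.empty
  (PySem.List.sorted hits.keys (fun t => t)).map (fun t => (t, hits.getD t []))

-- ===== PRECONDITION & SPEC =====
-- Pre_ excludes triples lists whose (subject, relation, object) keys repeat: such a list does not
-- represent a Python dict (dict construction collapses duplicate keys), so A never sees those inputs.
def Pre_get_entites_per_token (offsets : List (Int × Int)) (triples : List (String × String × String × List Int)) : Prop :=
  (triples.map (fun q => (q.1, q.2.1, q.2.2.1))).Nodup
instance (offsets : List (Int × Int)) (triples : List (String × String × String × List Int)) : Decidable (Pre_get_entites_per_token offsets triples) := by unfold Pre_get_entites_per_token; infer_instance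
def pvWitness_get_entites_per_token : (List (Int × Int)) × (List (String × String × String × List Int)) :=
  ([((0 : Int), (2 : Int)), ((1 : Int), (3 : Int))], [("a", "b", "c", [(1 : Int), (5 : Int)])])
def Spec_get_entites_per_token (offsets : List (Int × Int)) (triples : List (String × String × String × List Int)) (out : List (Int × List (String × String × String))) : Prop := out = get_entites_per_token_alt offsets triples
instance (offsets : List (Int × Int)) (triples : List (String × String × String × List Int)) (out : List (Int × List (String × String × String))) : Decidable (Spec_get_entites_per_token offsets triples out) := by unfold Spec_get_entites_per_token; infer_instance

-- ===== CLAIM (what is proved, stated in full; the proofs are below) =====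
def Claim_equal_get_entites_per_token : Prop := ∀ (offsets : List (Int × Int)) (triples : List (String × String × String × List Int)), Dom_get_entites_per_token offsets triples → Pre_get_entites_per_token offsets triples → Spec_get_entites_per_token offsets triples (get_entites_per_token offsets triples)

-- ===== LEMMAS AND PROOFS =====

/-- The key of a triples entry (Python dict key: the triple itself). -/
def pvKey (q : String × String × String × List Int) : String × String × String := (q.1, q.2.1, q.2.2.1)

/-- Does the mention `m` overlap the token span `p`? -/
def pvHit (p : Int × Int) (m : List Int) : Bool := m.any (fun c => decide (p.1 ≤ c ∧ c < p.2))

/-- Triples whose mention overlaps span `p`, in dict order. -/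
def pvTs (triples : List (String × String × String × List Int)) (p : Int × Int) : List (String × String × String) :=
  (triples.filter (fun q => pvHit p q.2.2.2)).map pvKey

/-- The common specification: entries (token index, its triples), ascending, nonempty only. -/
def pvSpec (triples : List (String × String × String × List Int)) : List (Int × Int) → Int → List (Int × List (String × String × String))
  | [], _ => []
  | p :: rest, j => (if pvTs triples p = [] then [] else [(j, pvTs triples p)]) ++ pvSpec triples rest (j + 1)

/-- Tokens (by index, ascending from j) whose span contains char c. -/
def pvToks (c : Int) : List (Int × Int) → Int → List Int
  | [], _ => []
  | p :: rest, j => (if p.1 ≤ c ∧ c < p.2 then [j] else []) ++ pvToks c rest (j + 1)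

lemma pvKey_def (q : String × String × String × List Int) : pvKey q = (q.1, q.2.1, q.2.2.1) := rfl

lemma pv_inter_ne_nil (p : Int × Int) (m : List Int) :
    (PySem.Set.inter (PySem.List.pyRange p.1 p.2) m ≠ []) ↔ pvHit p m = true := by
  unfold pvHit
  rw [Ne, List.eq_nil_iff_forall_not_mem]
  push Not
  simp only [PySem.Set.mem_inter, PySem.List.mem_pyRange_one,
    List.any_eq_true, decide_eq_true_eq]
  constructor
  · rintro ⟨x, ⟨h1, h2⟩, h3⟩; exact ⟨x, h3, h1, h2⟩
  · rintro ⟨x, h3, h1, h2⟩; exact ⟨x, ⟨h1, h2⟩, h3⟩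

lemma pv_set_fold (c : (String × String × String × List Int) → Prop) [DecidablePred c]
    (L : List (String × String × String × List Int)) (s : PySem.Set (String × String × String))
    (h1 : ∀ q ∈ L, pvKey q ∉ s) (h2 : (L.map pvKey).Nodup) :
    L.foldl (fun s q => if c q then PySem.Set.add s (pvKey q) else s) s
      = s ++ (L.filter (fun q => decide (c q))).map pvKey := by
  induction L generalizing s with
  | nil => simp
  | cons q L ih =>
    simp only [List.map_cons, List.nodup_cons] at h2
    simp only [List.foldl_cons, List.filter_cons]
    by_cases hc : c q
    · rw [if_pos hc, PySem.Set.add_of_not_mem (h1 q (List.mem_cons_self))]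
      rw [ih (s ++ [pvKey q]) ?_ h2.2]
      · simp [hc]
      · intro q' hq' hmem
        rcases List.mem_append.1 hmem with h | h
        · exact h1 q' (List.mem_cons_of_mem _ hq') h
        · exact h2.1 (List.mem_map.2 ⟨q', hq', (List.mem_singleton.1 h)⟩)
    · rw [if_neg hc, ih s (fun q' h' => h1 q' (List.mem_cons_of_mem _ h')) h2.2]
      simp [hc]

lemma pv_get?_append_last {ν : Type} (l : List (Int × ν)) (i : Int) (s : ν)
    (h : i ∉ l.map Prod.fst) : (PySem.Dict.mk (l ++ [(i, s)])).get? i = some s := by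
  simp only [PySem.Dict.get?, List.find?_append]
  rw [List.find?_eq_none.2, Option.none_or]
  · simp [List.find?]
  · intro p hp
    simp only [beq_iff_eq]
    intro hpe
    exact h (List.mem_map.2 ⟨p, hp, hpe⟩)

lemma pv_modify_append_last {ν : Type} (l : List (Int × ν)) (i : Int) (s d0 : ν) (f : ν → ν)
    (h : i ∉ l.map Prod.fst) :
    PySem.Dict.modify (PySem.Dict.mk (l ++ [(i, s)])) i d0 f = PySem.Dict.mk (l ++ [(i, f s)]) := by
  have hget := pv_get?_append_last l i s h
  have hc : (PySem.Dict.mk (l ++ [(i, s)])).contains i = true := by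
    rw [PySem.Dict.contains_eq_isSome_get?, hget]; rfl
  simp only [PySem.Dict.modify, PySem.Dict.getD_eq_get?_getD, hget, Option.getD_some]
  apply PySem.Dict.ext
  rw [PySem.Dict.items_insert_of_contains _ _ hc]
  show List.map _ (l ++ [(i, s)]) = l ++ [(i, f s)]
  rw [List.map_append]
  congr 1
  · conv_rhs => rw [← List.map_id l]
    apply List.map_congr_left
    intro p hp
    have hne : ¬ ((p.1 == i) = true) := by
      simp only [beq_iff_eq]
      exact fun he => h (List.mem_map.2 ⟨p, hp, he⟩)
    simp [hne]
  · simp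

lemma pvA_present (c : (String × String × String × List Int) → Prop) [DecidablePred c] (i : Int)
    (L : List (String × String × String × List Int)) (d0 : List (Int × PySem.Set (String × String × String)))
    (s : PySem.Set (String × String × String)) (h : i ∉ d0.map Prod.fst) :
    L.foldl (fun d q => if c q then PySem.Dict.modify d i PySem.Set.empty (fun s => s.add (pvKey q)) else d)
        (PySem.Dict.mk (d0 ++ [(i, s)]))
      = PySem.Dict.mk (d0 ++ [(i, L.foldl (fun s q => if c q then PySem.Set.add s (pvKey q) else s) s)]) := by
  induction L generalizing s with
  | nil => simp
  | cons q L ih =>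
    simp only [List.foldl_cons]
    by_cases hc : c q
    · rw [if_pos hc, if_pos hc, pv_modify_append_last d0 i s _ _ h]
      exact ih _
    · rw [if_neg hc, if_neg hc]
      exact ih s

lemma pvA_inner (c : (String × String × String × List Int) → Prop) [DecidablePred c] (i : Int)
    (L : List (String × String × String × List Int)) (d : PySem.Dict Int (PySem.Set (String × String × String)))
    (hfresh : i ∉ d.keys) (h2 : (L.map pvKey).Nodup) :
    L.foldl (fun d q => if c q then PySem.Dict.modify d i PySem.Set.empty (fun s => s.add (pvKey q)) else d) d
      = PySem.Dict.mk (d.items ++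
          (if (L.filter (fun q => decide (c q))) = [] then []
           else [(i, (L.filter (fun q => decide (c q))).map pvKey)])) := by
  induction L with
  | nil => simp
  | cons q L ih =>
    simp only [List.foldl_cons, List.filter_cons]
    simp only [List.map_cons, List.nodup_cons] at h2
    by_cases hc : c q
    · rw [if_pos hc]
      have hg : d.get? i = none := (PySem.Dict.get?_eq_none_iff_not_mem_keys d i).2 hfresh
      have hcon : d.contains i = false := by
        rw [PySem.Dict.contains_eq_isSome_get?, hg]; rfl
      have hsing : PySem.Set.add PySem.Set.empty (pvKey q) = [pvKey q] := by
        rw [PySem.Set.empty_eq, PySem.Set.add_of_not_mem (List.not_mem_nil), List.nil_append]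
      have hfirst : PySem.Dict.modify d i PySem.Set.empty (fun s => s.add (pvKey q))
          = PySem.Dict.mk (d.items ++ [(i, [pvKey q])]) := by
        apply PySem.Dict.ext
        simp only [PySem.Dict.modify, PySem.Dict.getD_eq_get?_getD, hg, Option.getD_none]
        rw [PySem.Dict.items_insert_of_not_contains _ _ hcon, hsing]
      have hfr2 : i ∉ d.items.map Prod.fst := by
        simpa [PySem.Dict.keys] using hfresh
      rw [hfirst, pvA_present c i L d.items [pvKey q] hfr2]
      rw [pv_set_fold c L [pvKey q] ?_ h2.2]
      · simp [hc]
      · intro q' hq' hm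
        exact h2.1 (List.mem_map.2 ⟨q', hq', List.mem_singleton.1 hm⟩)
    · rw [if_neg hc, ih h2.2]
      rw [decide_eq_false hc]
      simp

lemma pvSpec_append (tr : List (String × String × String × List Int)) (l1 l2 : List (Int × Int)) (j : Int) :
    pvSpec tr (l1 ++ l2) j = pvSpec tr l1 j ++ pvSpec tr l2 (j + l1.length) := by
  induction l1 generalizing j with
  | nil => simp [pvSpec]
  | cons p rest ih =>
    simp only [List.cons_append, pvSpec, ih (j + 1), List.length_cons, List.append_assoc]
    congr 2
    push_cast
    ring_nf

lemma pvSpec_mem (tr : List (String × String × String × List Int)) (l : List (Int × Int)) (j : Int)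
    (e : Int × List (String × String × String)) :
    e ∈ pvSpec tr l j ↔ ∃ (k : Nat) (h : k < l.length), e = (j + k, pvTs tr l[k]) ∧ pvTs tr l[k] ≠ [] := by
  induction l generalizing j with
  | nil => simp [pvSpec]
  | cons p rest ih =>
    simp only [pvSpec, List.mem_append]
    constructor
    · rintro (h | h)
      · by_cases hts : pvTs tr p = []
        · simp [hts] at h
        · simp only [if_neg hts, List.mem_singleton] at h
          exact ⟨0, by simp, by simpa using h, by simpa using hts⟩
      · obtain ⟨k, hk, he, hne⟩ := (ih (j + 1)).1 h
        refine ⟨k + 1, by simpa using Nat.succ_lt_succ hk, ?_, by simpa using hne⟩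
        rw [he, List.getElem_cons_succ]
        simp only [Prod.mk.injEq]
        exact ⟨by push_cast; omega, trivial⟩
    · rintro ⟨k, hk, he, hne⟩
      cases k with
      | zero =>
        left
        simp only [List.getElem_cons_zero] at he hne
        simp only [if_neg hne, List.mem_singleton]
        simpa using he
      | succ k =>
        right
        refine (ih (j + 1)).2 ⟨k, by simpa using hk, ?_, by simpa using hne⟩
        rw [he, List.getElem_cons_succ]
        simp only [Prod.mk.injEq]
        exact ⟨by push_cast; omega, trivial⟩

lemma pvSpec_keys_pairwise (tr : List (String × String × String × List Int)) (l : List (Int × Int)) (j : Int) :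
    ((pvSpec tr l j).map Prod.fst).Pairwise (· < ·) := by
  induction l generalizing j with
  | nil => simp [pvSpec]
  | cons p rest ih =>
    have hbd : ∀ x ∈ (pvSpec tr rest (j + 1)).map Prod.fst, j < x := by
      intro x hx
      obtain ⟨e, he, hfst⟩ := List.mem_map.1 hx
      obtain ⟨k, hk, hek, _⟩ := (pvSpec_mem tr rest (j + 1) e).1 he
      rw [← hfst, hek]
      have : (0 : Int) ≤ (k : Nat) := Int.natCast_nonneg k
      omega
    simp only [pvSpec, List.map_append]
    rw [List.pairwise_append]
    refine ⟨?_, ih (j + 1), ?_⟩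
    · by_cases hts : pvTs tr p = [] <;> simp [hts]
    · intro x hx y hy
      by_cases hts : pvTs tr p = []
      · simp [hts] at hx
      · simp only [if_neg hts, List.map_cons, List.map_nil, List.mem_singleton] at hx
        rw [hx]
        exact hbd y hy

lemma pvSpec_map (tr : List (String × String × String × List Int)) (l : List (Int × Int)) (j : Int)
    (V : Int → List (String × String × String))
    (hV : ∀ (k : Nat) (h : k < l.length), V (j + k) = pvTs tr l[k]) :
    ((pvSpec tr l j).map Prod.fst).map (fun t => (t, V t)) = pvSpec tr l j := by
  induction l generalizing j V with
  | nil => simp [pvSpec]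
  | cons p rest ih =>
    have h0 : V j = pvTs tr p := by simpa using hV 0 (by simp)
    have hshift : ∀ (k : Nat) (h : k < rest.length), V ((j + 1) + (k : Nat)) = pvTs tr rest[k] := by
      intro k hk
      have := hV (k + 1) (by simpa using Nat.succ_lt_succ hk)
      rw [List.getElem_cons_succ] at this
      have harr : (j + 1) + ((k : Nat) : Int) = j + (((k : Nat) + 1 : Nat) : Int) := by push_cast; omega
      rw [harr]
      exact this
    by_cases hts : pvTs tr p = []
    · simp only [pvSpec, if_pos hts, List.nil_append]
      exact ih (j + 1) V hshift
    · simp only [pvSpec, if_neg hts, List.cons_append, List.nil_append, List.map_cons]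
      rw [h0, ih (j + 1) V hshift]

lemma pvA_eq_spec (offsets : List (Int × Int)) (triples : List (String × String × String × List Int))
    (hpre : (triples.map pvKey).Nodup) :
    get_entites_per_token offsets triples = pvSpec triples offsets 0 := by
  simp only [get_entites_per_token, PySem.List.pyRange_zero_natCast, List.foldl_map]
  simp only [← pvKey_def]
  have main : ∀ n, n ≤ offsets.length →
      (List.range n).foldl (fun d (k : Nat) =>
        triples.foldl (fun d q =>
          if PySem.Set.inter (PySem.List.pyRange
                (PySem.List.pyGetD offsets (↑k) (0, 0)).1
                (PySem.List.pyGetD offsets (↑k) (0, 0)).2) q.2.2.2 ≠ [] then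
            PySem.Dict.modify d (↑k) PySem.Set.empty (fun s => s.add (pvKey q))
          else d) d) PySem.Dict.empty
      = PySem.Dict.mk (pvSpec triples (offsets.take n) 0) := by
    intro n
    induction n with
    | zero =>
      intro _
      simp only [List.range_zero, List.foldl_nil, List.take_zero, pvSpec]
      rfl
    | succ n ih =>
      intro hn
      have hlt : n < offsets.length := hn
      rw [List.range_succ, List.foldl_append, List.foldl_cons, List.foldl_nil,
        ih (Nat.le_of_lt hlt)]
      have hoff : PySem.List.pyGetD offsets (↑n) (0, 0) = offsets[n] := by
        rw [PySem.List.pyGetD_natCast, List.getD_eq_getElem _ _ hlt]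
      rw [hoff]
      have hfresh : ((n : Nat) : Int) ∉ (PySem.Dict.mk (pvSpec triples (offsets.take n) 0)).keys := by
        rw [PySem.Dict.keys_mk]
        intro hmem
        obtain ⟨e, he, hfst⟩ := List.mem_map.1 hmem
        obtain ⟨k, hk, hek, _⟩ := (pvSpec_mem _ _ _ e).1 he
        rw [hek] at hfst
        simp only at hfst
        have hklen : k < n := by
          simp only [List.length_take] at hk
          omega
        omega
      rw [pvA_inner _ ((n : Nat) : Int) triples _ hfresh hpre]
      apply PySem.Dict.ext
      show pvSpec triples (offsets.take n) 0 ++ _ = _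
      rw [List.take_add_one, List.getElem?_eq_getElem hlt]
      rw [pvSpec_append]
      congr 1
      have hflt : triples.filter (fun q => decide (PySem.Set.inter
            (PySem.List.pyRange (offsets[n]).1 (offsets[n]).2) q.2.2.2 ≠ []))
          = triples.filter (fun q => pvHit offsets[n] q.2.2.2) := by
        apply List.filter_congr
        intro q _
        rw [Bool.eq_iff_iff, decide_eq_true_iff]
        exact pv_inter_ne_nil offsets[n] q.2.2.2
      rw [hflt]
      have hlen : (offsets.take n).length = n := by simp [Nat.min_eq_left (Nat.le_of_lt hlt)]
      simp only [Option.toList_some, pvSpec, List.append_nil, hlen]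
      by_cases hf : triples.filter (fun q => pvHit offsets[n] q.2.2.2) = []
      · simp [pvTs, hf]
      · simp [pvTs, hf, List.map_eq_nil_iff]
  have := main offsets.length le_rfl
  rw [List.take_length] at this
  rw [this]

lemma pvToks_mem (c : Int) (l : List (Int × Int)) (j x : Int) :
    x ∈ pvToks c l j ↔ ∃ (k : Nat) (h : k < l.length), x = j + k ∧ (l[k].1 ≤ c ∧ c < l[k].2) := by
  induction l generalizing j with
  | nil => simp [pvToks]
  | cons p rest ih =>
    simp only [pvToks, List.mem_append]
    constructor
    · rintro (h | h)
      · by_cases hp : p.1 ≤ c ∧ c < p.2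
        · simp only [if_pos hp, List.mem_singleton] at h
          exact ⟨0, by simp, by simpa using h, by simpa using hp⟩
        · simp [hp] at h
      · obtain ⟨k, hk, he, hsp⟩ := (ih (j + 1)).1 h
        refine ⟨k + 1, by simpa using Nat.succ_lt_succ hk, ?_, by simpa using hsp⟩
        rw [he]
        push_cast
        omega
    · rintro ⟨k, hk, he, hsp⟩
      cases k with
      | zero =>
        left
        simp only [List.getElem_cons_zero] at hsp
        simp only [if_pos hsp, List.mem_singleton]
        simpa using he
      | succ k =>
        right
        refine (ih (j + 1)).2 ⟨k, by simpa using hk, ?_, by simpa using hsp⟩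
        rw [he]
        push_cast
        omega

lemma pvToks_eq_comp (c : Int) :
    ∀ (l : List (Int × Int)) (j : Int),
    (PySem.List.enumerate l j).filterMap (fun p => if p.2.1 ≤ c ∧ c < p.2.2 then some p.1 else none)
      = pvToks c l j := by
  intro l
  induction l with
  | nil => intro j; simp [PySem.List.enumerate_nil, pvToks]
  | cons p rest ih =>
    intro j
    rw [PySem.List.enumerate_cons]
    simp only [List.filterMap_cons]
    by_cases hp : p.1 ≤ c ∧ c < p.2
    · rw [if_pos hp]
      simp only [pvToks, if_pos hp, ih (j + 1)]
      rfl
    · rw [if_neg hp]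
      simp only [pvToks, if_neg hp, ih (j + 1)]
      rfl

lemma pv_memo_inner (f : Int → List Int) (m : List Int) :
    ∀ (d : PySem.Dict Int (List Int)), (∀ c v, d.get? c = some v → v = f c) →
    (∀ c v, (m.foldl (fun d c => if d.contains c = false then d.insert c (f c) else d) d).get? c = some v → v = f c)
    ∧ (∀ c, d.contains c = true → (m.foldl (fun d c => if d.contains c = false then d.insert c (f c) else d) d).contains c = true)
    ∧ (∀ c ∈ m, (m.foldl (fun d c => if d.contains c = false then d.insert c (f c) else d) d).contains c = true) := by
  induction m with
  | nil => exact fun d hd => ⟨hd, fun _ h => h, by simp⟩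
  | cons c0 m ih =>
    intro d hd
    simp only [List.foldl_cons]
    set d' := if d.contains c0 = false then d.insert c0 (f c0) else d with hd'def
    have hd' : ∀ c v, d'.get? c = some v → v = f c := by
      intro c v hv
      rw [hd'def] at hv
      by_cases hc : d.contains c0 = false
      · rw [if_pos hc, PySem.Dict.get?_insert] at hv
        by_cases hcc : c = c0
        · rw [if_pos hcc] at hv
          exact (Option.some_inj.1 hv).symm.trans (by rw [hcc])
        · rw [if_neg hcc] at hv
          exact hd c v hv
      · rw [if_neg hc] at hv
        exact hd c v hv
    have hmono : ∀ c, d.contains c = true → d'.contains c = true := by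
      intro c hc
      rw [hd'def]
      by_cases hc0 : d.contains c0 = false
      · rw [if_pos hc0, PySem.Dict.contains_eq_isSome_get?, PySem.Dict.get?_insert]
        by_cases hcc : c = c0
        · simp [hcc]
        · rw [if_neg hcc, ← PySem.Dict.contains_eq_isSome_get?]
          exact hc
      · rw [if_neg hc0]; exact hc
    have hc0 : d'.contains c0 = true := by
      rw [hd'def]
      by_cases hc0 : d.contains c0 = false
      · rw [if_pos hc0]
        exact PySem.Dict.contains_insert_self _ _ _
      · rw [if_neg hc0]
        simpa using hc0
    obtain ⟨H1, H2, H3⟩ := ih d' hd'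
    refine ⟨H1, fun c hc => H2 c (hmono c hc), ?_⟩
    intro c hc
    rcases List.mem_cons.1 hc with h | h
    · rw [h]; exact H2 c0 hc0
    · exact H3 c h

lemma pv_memo (f : Int → List Int) (triples : List (String × String × String × List Int)) :
    (∀ c v, (triples.foldl (fun d q => q.2.2.2.foldl (fun d c =>
        if d.contains c = false then d.insert c (f c) else d) d) PySem.Dict.empty).get? c = some v → v = f c)
    ∧ (∀ q ∈ triples, ∀ c ∈ q.2.2.2, (triples.foldl (fun d q => q.2.2.2.foldl (fun d c =>
        if d.contains c = false then d.insert c (f c) else d) d) PySem.Dict.empty).contains c = true) := by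
  suffices h : ∀ (d : PySem.Dict Int (List Int)), (∀ c v, d.get? c = some v → v = f c) →
      (∀ c v, (triples.foldl (fun d q => q.2.2.2.foldl (fun d c =>
        if d.contains c = false then d.insert c (f c) else d) d) d).get? c = some v → v = f c)
      ∧ (∀ c, d.contains c = true → (triples.foldl (fun d q => q.2.2.2.foldl (fun d c =>
        if d.contains c = false then d.insert c (f c) else d) d) d).contains c = true)
      ∧ (∀ q ∈ triples, ∀ c ∈ q.2.2.2, (triples.foldl (fun d q => q.2.2.2.foldl (fun d c =>
        if d.contains c = false then d.insert c (f c) else d) d) d).contains c = true) by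
    obtain ⟨h1, _, h3⟩ := h PySem.Dict.empty (by intro c v hv; rw [PySem.Dict.get?_empty] at hv; cases hv)
    exact ⟨h1, h3⟩
  induction triples with
  | nil => exact fun d hd => ⟨hd, fun _ h => h, by simp⟩
  | cons q L ih =>
    intro d hd
    simp only [List.foldl_cons]
    obtain ⟨g1, g2, g3⟩ := pv_memo_inner f q.2.2.2 d hd
    obtain ⟨H1, H2, H3⟩ := ih _ g1
    refine ⟨H1, fun c hc => H2 c (g2 c hc), ?_⟩
    intro q' hq' c hc
    rcases List.mem_cons.1 hq' with h | h
    · subst h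
      exact H2 c (g3 c hc)
    · exact H3 q' h c hc

lemma pv_tokfold (l : List Int) (k : String × String × String) (t : Int)
    (h : PySem.Dict Int (PySem.Set (String × String × String))) :
    (l.foldl (fun h t' => PySem.Dict.modify h t' PySem.Set.empty (fun s => s.add k)) h).getD t []
      = if t ∈ l then (h.getD t []).add k else h.getD t [] := by
  induction l generalizing h with
  | nil => simp
  | cons t0 l ih =>
    simp only [List.foldl_cons]
    rw [ih]
    simp only [PySem.Set.empty_eq, PySem.Dict.getD_modify]
    by_cases hte : t = t0 <;> by_cases hmem : t ∈ l <;>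
      simp [hte, hmem, List.mem_cons]

lemma pv_charsfold (C : Int → List Int) (m : List Int) (k : String × String × String) (t : Int)
    (h : PySem.Dict Int (PySem.Set (String × String × String))) :
    (m.foldl (fun h c => (C c).foldl (fun h t' => PySem.Dict.modify h t' PySem.Set.empty (fun s => s.add k)) h) h).getD t []
      = if ∃ c ∈ m, t ∈ C c then (h.getD t []).add k else h.getD t [] := by
  induction m generalizing h with
  | nil => simp
  | cons c0 m ih =>
    simp only [List.foldl_cons]
    rw [ih, pv_tokfold]
    simp only [List.exists_mem_cons_iff]
    by_cases h0 : t ∈ C c0 <;> by_cases hm : ∃ c ∈ m, t ∈ C c <;>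
      simp [h0, hm]

lemma pv_hitsfold (C : Int → List Int) (L : List (String × String × String × List Int)) (t : Int)
    (h : PySem.Dict Int (PySem.Set (String × String × String))) :
    (L.foldl (fun h q => q.2.2.2.foldl (fun h c => (C c).foldl (fun h t' =>
        PySem.Dict.modify h t' PySem.Set.empty (fun s => s.add (q.1, q.2.1, q.2.2.1))) h) h) h).getD t []
      = L.foldl (fun s q => if ∃ c ∈ q.2.2.2, t ∈ C c then PySem.Set.add s (pvKey q) else s) (h.getD t []) := by
  induction L generalizing h with
  | nil => simp
  | cons q L ih =>
    simp only [List.foldl_cons]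
    rw [ih, pv_charsfold]
    simp only [pvKey]

lemma pv_keys_charsfold (C : Int → List Int) (k : String × String × String) (m : List Int)
    (h : PySem.Dict Int (PySem.Set (String × String × String))) :
    (m.foldl (fun h c => (C c).foldl (fun h t' => PySem.Dict.modify h t' PySem.Set.empty (fun s => s.add k)) h) h).keys
      = PySem.Set.update h.keys (m.flatMap C) := by
  induction m generalizing h with
  | nil => simp
  | cons c0 m ih =>
    simp only [List.foldl_cons, List.flatMap_cons]
    rw [ih, PySem.Dict.keys_foldl_modify (C c0) PySem.Set.empty (fun _ _ s => s.add k) h,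
      ← PySem.Set.update_append]

lemma pv_hitskeys (C : Int → List Int) (L : List (String × String × String × List Int))
    (h : PySem.Dict Int (PySem.Set (String × String × String))) :
    (L.foldl (fun h q => q.2.2.2.foldl (fun h c => (C c).foldl (fun h t' =>
        PySem.Dict.modify h t' PySem.Set.empty (fun s => s.add (q.1, q.2.1, q.2.2.1))) h) h) h).keys
      = PySem.Set.update h.keys (L.flatMap (fun q => q.2.2.2.flatMap C)) := by
  induction L generalizing h with
  | nil => simp
  | cons q L ih =>
    simp only [List.foldl_cons, List.flatMap_cons]
    rw [ih, pv_keys_charsfold, PySem.Set.update_append]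

lemma pvB_eq_spec (offsets : List (Int × Int)) (triples : List (String × String × String × List Int))
    (hpre : (triples.map pvKey).Nodup) :
    get_entites_per_token_alt offsets triples = pvSpec triples offsets 0 := by
  simp only [get_entites_per_token_alt]
  set f : Int → List Int := fun c => (PySem.List.enumerate offsets 0).filterMap (fun p =>
    if p.2.1 ≤ c ∧ c < p.2.2 then some p.1 else none) with hfdef
  set T := triples.foldl (fun d q => q.2.2.2.foldl (fun d c =>
      if d.contains c = false then d.insert c (f c) else d) d) PySem.Dict.empty with hT
  have hfval : ∀ c : Int, f c = pvToks c offsets 0 := by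
    intro c
    rw [hfdef]
    exact pvToks_eq_comp c offsets 0
  obtain ⟨hTget, hTcont⟩ := pv_memo f triples
  rw [← hT] at hTget hTcont
  have hCm : ∀ q ∈ triples, ∀ c ∈ q.2.2.2, T.getD c [] = pvToks c offsets 0 := by
    intro q hq c hc
    have hcon := hTcont q hq c hc
    rw [PySem.Dict.contains_eq_isSome_get?] at hcon
    rw [PySem.Dict.getD_eq_get?_getD]
    cases hget : T.get? c with
    | none => rw [hget] at hcon; cases hcon
    | some v =>
      rw [Option.getD_some, hTget c v hget]
      exact hfval c
  set hits := triples.foldl (fun h q => q.2.2.2.foldl (fun h c =>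
      (T.getD c []).foldl (fun h t =>
        PySem.Dict.modify h t PySem.Set.empty (fun s => s.add (q.1, q.2.1, q.2.2.1))) h) h)
      PySem.Dict.empty with hH
  have hval : ∀ t : Int, hits.getD t []
      = triples.foldl (fun s q => if ∃ c ∈ q.2.2.2, t ∈ T.getD c []
          then PySem.Set.add s (pvKey q) else s) [] := by
    intro t
    rw [hH]
    have := pv_hitsfold (fun c => T.getD c []) triples t PySem.Dict.empty
    simpa using this
  have hval2 : ∀ (k : Nat) (hk : k < offsets.length), hits.getD ((k : Nat) : Int) [] = pvTs triples offsets[k] := by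
    intro k hk
    rw [hval]
    rw [pv_set_fold (fun q => ∃ c ∈ q.2.2.2, ((k : Nat) : Int) ∈ T.getD c []) triples []
      (by simp) hpre, List.nil_append]
    unfold pvTs
    apply congrArg (List.map pvKey)
    apply List.filter_congr
    intro q hq
    rw [Bool.eq_iff_iff, decide_eq_true_iff]
    unfold pvHit
    simp only [List.any_eq_true, decide_eq_true_eq]
    constructor
    · rintro ⟨c, hcm, hctok⟩
      rw [hCm q hq c hcm] at hctok
      obtain ⟨k', hk', hek, hsp⟩ := (pvToks_mem c offsets 0 _).1 hctok
      have hkk : k' = k := by omega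
      subst hkk
      exact ⟨c, hcm, hsp⟩
    · rintro ⟨c, hcm, hsp⟩
      refine ⟨c, hcm, ?_⟩
      rw [hCm q hq c hcm]
      exact (pvToks_mem c offsets 0 _).2 ⟨k, hk, by simp, hsp⟩
  have hkeys : hits.keys = PySem.Set.ofList (triples.flatMap (fun q =>
      q.2.2.2.flatMap (fun c => T.getD c []))) := by
    rw [hH]
    have := pv_hitskeys (fun c => T.getD c []) triples PySem.Dict.empty
    simp only [PySem.Dict.keys_empty] at this
    rw [this, show ([] : List Int) = (PySem.Set.empty : PySem.Set Int) from rfl,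
      PySem.Set.update_empty]
  have hmemkeys : ∀ x : Int, x ∈ hits.keys ↔
      ∃ (k : Nat) (h : k < offsets.length), x = (k : Int) ∧ pvTs triples offsets[k] ≠ [] := by
    intro x
    rw [hkeys, PySem.Set.mem_ofList]
    simp only [List.mem_flatMap]
    constructor
    · rintro ⟨q, hq, c, hcm, hx⟩
      rw [hCm q hq c hcm] at hx
      obtain ⟨k, hk, hek, hsp⟩ := (pvToks_mem c offsets 0 x).1 hx
      refine ⟨k, hk, by simpa using hek, ?_⟩
      intro hnil
      have hfn := List.filter_eq_nil_iff.1 (List.map_eq_nil_iff.1 hnil)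
      apply hfn q hq
      unfold pvHit
      simp only [List.any_eq_true, decide_eq_true_eq]
      exact ⟨c, hcm, hsp⟩
    · rintro ⟨k, hk, hx, hne⟩
      have hex : ∃ q ∈ triples, pvHit offsets[k] q.2.2.2 = true := by
        by_contra hno
        push Not at hno
        apply hne
        unfold pvTs
        rw [List.filter_eq_nil_iff.2 (by intro q hq; simpa using hno q hq)]
        rfl
      obtain ⟨q, hq, hph⟩ := hex
      unfold pvHit at hph
      simp only [List.any_eq_true, decide_eq_true_eq] at hph
      obtain ⟨c, hcm, hsp⟩ := hph
      refine ⟨q, hq, c, hcm, ?_⟩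
      rw [hCm q hq c hcm]
      exact (pvToks_mem c offsets 0 x).2 ⟨k, hk, by simpa using hx, hsp⟩
  have hnd2 : ((pvSpec triples offsets 0).map Prod.fst).Nodup :=
    (pvSpec_keys_pairwise triples offsets 0).imp (fun h => ne_of_lt h)
  have hsorted : PySem.List.sorted hits.keys (fun t => t) = (pvSpec triples offsets 0).map Prod.fst := by
    apply PySem.List.sorted_eq_of_perm_of_pairwise_lt
    · rw [List.perm_ext_iff_of_nodup hnd2 (by rw [hkeys]; exact PySem.Set.nodup_ofList _)]
      intro a
      rw [hmemkeys a]
      constructor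
      · intro hmem
        obtain ⟨e, he, hfst⟩ := List.mem_map.1 hmem
        obtain ⟨k, hk, hek, hne⟩ := (pvSpec_mem triples offsets 0 e).1 he
        exact ⟨k, hk, by rw [← hfst, hek]; simp, hne⟩
      · rintro ⟨k, hk, hx, hne⟩
        exact List.mem_map.2 ⟨((0 : Int) + k, pvTs triples (offsets[k]'hk)),
          (pvSpec_mem triples offsets 0 _).2 ⟨k, hk, rfl, hne⟩, by simpa using hx.symm⟩
    · exact pvSpec_keys_pairwise triples offsets 0
  rw [hsorted]
  apply pvSpec_map
  intro k hk
  have := hval2 k hk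
  simpa using this

-- ===== VERDICT (by name: the statement is the Claim_ definition above) =====
theorem get_entites_per_token_spec : Claim_equal_get_entites_per_token := by
  intro offsets triples _ hpre
  unfold Spec_get_entites_per_token
  rw [pvA_eq_spec offsets triples hpre, pvB_eq_spec offsets triples hpre]
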